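-- pv_equiv track=rewrite | github.com/namndh/DSA | sparse_table/C_Dowry.py | get_sum_value
-- ===== SOURCE A (Python) =====
-- def get_bit(number, index):
--     return (number >> index) & 1
--
-- def get_sum_value(jews):
--     sum_val_map = []
--     for number in range(0, 1 << len(jews)):
--         sum_value = 0
--         sum_weight = 0
--         for i in range(len(jews)):
--             bit_at_index = get_bit(number, i)
--             sum_value += bit_at_index*jews[i][1]
--             sum_weight += bit_at_index*jews[i][0]
--         sum_val_map.append([sum_weight, sum_value])
--     return sum_val_map
-- ===== SOURCE B (Python) =====
-- def get_sum_value(jews):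
--     result = [[0, 0]]
--     for jew in reversed(jews):
--         w, v = jew[0], jew[1]
--         result = [p for q in result for p in (q, [q[0] + w, q[1] + v])]
--     return result
-- ===== Notes on version B (the rewrite author's own statement) =====
-- stated objective: alternative
-- what changed: Replaces A's per-subset inner loop over all n items with a doubling construction: starting from [[0,0]], each item processed back-to-front emits every existing row plus that row extended with the item, yielding the same bitmask-ordered table (intended as faster per row; a timing run measured 13.14x at n=256 but could not confirm at the largest size, where both time out).
import Mathlib
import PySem

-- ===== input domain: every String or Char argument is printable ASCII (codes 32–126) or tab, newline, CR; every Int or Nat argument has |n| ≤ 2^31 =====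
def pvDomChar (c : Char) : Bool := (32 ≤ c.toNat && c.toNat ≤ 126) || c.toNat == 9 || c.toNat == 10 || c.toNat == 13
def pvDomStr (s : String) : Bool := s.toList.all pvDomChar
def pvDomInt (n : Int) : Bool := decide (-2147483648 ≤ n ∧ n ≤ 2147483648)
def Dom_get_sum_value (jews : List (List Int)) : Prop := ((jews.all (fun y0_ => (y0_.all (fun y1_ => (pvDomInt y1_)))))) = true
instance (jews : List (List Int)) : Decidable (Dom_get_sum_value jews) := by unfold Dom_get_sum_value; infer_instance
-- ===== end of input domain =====

-- B replaces A's per-subset inner loop over all n items by a doubling construction: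
-- each item, taken back-to-front, emits every existing row and that row extended
-- with the item, producing the same bitmask-ordered table by a different algorithm.

-- ===== PORT A =====
-- index is nonnegative at every call site (a range(len(jews)) index), so .toNat is exact there
def get_bit (number : Int) (index : Int) : Int :=
  PySem.Int.band (number >>> index.toNat) 1

def get_sum_value (jews : List (List Int)) : List (List Int) :=
  (PySem.List.pyRange 0 ((1 : Int) <<< jews.length) 1).foldl
    (fun sum_val_map number =>
      let s :=
        (PySem.List.pyRange 0 (jews.length : Int) 1).foldl
          (fun (p : Int × Int) i =>
            let bit_at_index := get_bit number i
            (p.1 + bit_at_index * PySem.List.pyGetD (PySem.List.pyGetD jews i []) 1 0,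
             p.2 + bit_at_index * PySem.List.pyGetD (PySem.List.pyGetD jews i []) 0 0))
          (0, 0)
      sum_val_map ++ [[s.2, s.1]])
    []

-- ===== PORT B =====
def get_sum_value_alt (jews : List (List Int)) : List (List Int) :=
  jews.reverse.foldl
    (fun result jew =>
      let w := PySem.List.pyGetD jew 0 0
      let v := PySem.List.pyGetD jew 1 0
      result.flatMap (fun q =>
        [q, [PySem.List.pyGetD q 0 0 + w, PySem.List.pyGetD q 1 0 + v]]))
    [[0, 0]]

-- ===== PRECONDITION & SPEC =====
-- Pre_ excludes exactly the inputs on which the Python A raises IndexError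
-- (some inner list shorter than 2, accessed as jews[i][0]/jews[i][1]).
def Pre_get_sum_value (jews : List (List Int)) : Prop := ∀ j ∈ jews, 2 ≤ j.length
instance (jews : List (List Int)) : Decidable (Pre_get_sum_value jews) := by
  unfold Pre_get_sum_value; infer_instance
def pvWitness_get_sum_value : List (List Int) := [[3, 10], [4, 7]]

def Spec_get_sum_value (jews : List (List Int)) (out : List (List Int)) : Prop := out = get_sum_value_alt jews
instance (jews : List (List Int)) (out : List (List Int)) : Decidable (Spec_get_sum_value jews out) := by unfold Spec_get_sum_value; infer_instance

-- ===== CLAIM (what is proved, stated in full; the proofs are below) =====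
def Claim_equal_get_sum_value : Prop := ∀ (jews : List (List Int)), Dom_get_sum_value jews → Pre_get_sum_value jews → Spec_get_sum_value jews (get_sum_value jews)

-- ===== LEMMAS AND PROOFS =====

-- the common specification: weight/value sum of the subset selected by the bits of k
def pvS : List (List Int) → Nat → Int × Int
  | [], _ => (0, 0)
  | j :: t, k =>
    let p := pvS t (k / 2)
    (p.1 + ((k % 2 : Nat) : Int) * PySem.List.pyGetD j 0 0,
     p.2 + ((k % 2 : Nat) : Int) * PySem.List.pyGetD j 1 0)

lemma shiftLeft_one_eq (n : Nat) : (1 : Int) <<< n = ((2 ^ n : Nat) : Int) := by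
  simp [Int.shiftLeft_eq]

lemma get_bit_zero (k : Nat) : get_bit (k : Int) 0 = ((k % 2 : Nat) : Int) := by
  simp [get_bit, PySem.Int.band_one]

lemma get_bit_succ (k i : Nat) : get_bit (k : Int) ((i + 1 : Nat) : Int) = get_bit ((k / 2 : Nat) : Int) (i : Int) := by
  simp only [get_bit, Int.toNat_natCast, ← Int.natCast_shiftRight, Nat.shiftRight_succ_inside]

lemma inner_eq (jews : List (List Int)) (k : Nat) (a b : Int) :
    (List.range jews.length).foldl
      (fun (p : Int × Int) (i : Nat) =>
        (p.1 + get_bit (k : Int) (i : Int) * (jews.getD i []).getD 1 0,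
         p.2 + get_bit (k : Int) (i : Int) * (jews.getD i []).getD 0 0))
      (a, b)
    = (a + (pvS jews k).2, b + (pvS jews k).1) := by
  induction jews generalizing k a b with
  | nil => simp [pvS]
  | cons j t ih =>
    rw [List.length_cons, List.range_succ_eq_map]
    simp only [List.foldl_cons, List.foldl_map, Nat.succ_eq_add_one, List.getD_cons_succ,
      List.getD_cons_zero, get_bit_zero, get_bit_succ, Nat.cast_zero]
    rw [ih (k / 2)]
    simp only [pvS, PySem.List.pyGetD_ofNat', Prod.mk.injEq]
    constructor <;> ring

lemma A_eq (jews : List (List Int)) :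
    get_sum_value jews
      = (List.range (2 ^ jews.length)).map (fun k => [(pvS jews k).1, (pvS jews k).2]) := by
  simp only [get_sum_value, shiftLeft_one_eq, PySem.List.pyRange_zero_natCast, List.foldl_map,
    PySem.List.pyGetD_natCast, PySem.List.pyGetD_ofNat']
  rw [PySem.List.foldl_append_singleton_eq_map]
  simp only [List.nil_append]
  refine List.map_congr_left ?_
  intro k _
  rw [inner_eq]
  simp

lemma range_double {α : Type} (N : Nat) (f : Nat → α) :
    (List.range (2 * N)).map f
      = (List.range N).flatMap (fun m => [f (2 * m), f (2 * m + 1)]) := by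
  induction N with
  | zero => simp
  | succ n ih =>
    rw [show 2 * (n + 1) = 2 * n + 1 + 1 by ring, List.range_succ, List.range_succ,
      List.range_succ, List.map_append, List.map_append, ih, List.flatMap_append]
    simp [List.append_assoc]

lemma B_eq (jews : List (List Int)) :
    get_sum_value_alt jews
      = (List.range (2 ^ jews.length)).map (fun k => [(pvS jews k).1, (pvS jews k).2]) := by
  induction jews with
  | nil => decide
  | cons j t ih =>
    have hstep : get_sum_value_alt (j :: t)
        = (get_sum_value_alt t).flatMap (fun q =>
            [q, [PySem.List.pyGetD q 0 0 + PySem.List.pyGetD j 0 0,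
                 PySem.List.pyGetD q 1 0 + PySem.List.pyGetD j 1 0]]) := by
      simp [get_sum_value_alt, List.foldl_append]
    rw [hstep, ih, List.length_cons, show 2 ^ (t.length + 1) = 2 * 2 ^ t.length by ring,
      range_double, List.flatMap_map]
    have hfun : ∀ m : Nat,
        [[(pvS t m).1, (pvS t m).2],
         [PySem.List.pyGetD [(pvS t m).1, (pvS t m).2] 0 0 + PySem.List.pyGetD j 0 0,
          PySem.List.pyGetD [(pvS t m).1, (pvS t m).2] 1 0 + PySem.List.pyGetD j 1 0]]
        = [[(pvS (j :: t) (2 * m)).1, (pvS (j :: t) (2 * m)).2],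
           [(pvS (j :: t) (2 * m + 1)).1, (pvS (j :: t) (2 * m + 1)).2]] := by
      intro m
      have h1 : 2 * m / 2 = m := by omega
      have h2 : 2 * m % 2 = 0 := by omega
      have h3 : (2 * m + 1) / 2 = m := by omega
      have h4 : (2 * m + 1) % 2 = 1 := by omega
      simp [pvS, h1, h2, h3, h4, PySem.List.pyGetD_ofNat']
    simp only [hfun]

-- ===== VERDICT (by name: the statement is the Claim_ definition above) =====
theorem get_sum_value_spec : Claim_equal_get_sum_value := by
  intro jews _ _
  unfold Spec_get_sum_value
  rw [A_eq, B_eq]
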